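-- pv_equiv track=rewrite | github.com/ptarau/PythonProvers | formulas.py | part2list
-- ===== SOURCE A (Python) =====
-- def part2list(N,pss) :
--   res=[]
--   l=len(pss)
--   for i in range(N) :
--     for j in range(l) :
--       if i in pss[j] :
--         res.append(j)
--   return res
-- ===== SOURCE B (Python) =====
-- def part2list(N, pss):
--     # index each element once: element -> ordered list of block indices containing it
--     at = {}
--     for j, ps in enumerate(pss):
--         for x in dict.fromkeys(ps):
--             at.setdefault(x, []).append(j)
--     res = []
--     for i in range(N):
--         res += at.get(i, [])
--     return res
-- ===== Notes on version B (the rewrite author's own statement) =====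
-- stated objective: faster
-- what changed: Instead of scanning every block for every i (membership test per (i, block) pair), B builds a dictionary element -> ordered list of block indices in one pass over pss and then concatenates at.get(i, []) for i in range(N).
import Mathlib
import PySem

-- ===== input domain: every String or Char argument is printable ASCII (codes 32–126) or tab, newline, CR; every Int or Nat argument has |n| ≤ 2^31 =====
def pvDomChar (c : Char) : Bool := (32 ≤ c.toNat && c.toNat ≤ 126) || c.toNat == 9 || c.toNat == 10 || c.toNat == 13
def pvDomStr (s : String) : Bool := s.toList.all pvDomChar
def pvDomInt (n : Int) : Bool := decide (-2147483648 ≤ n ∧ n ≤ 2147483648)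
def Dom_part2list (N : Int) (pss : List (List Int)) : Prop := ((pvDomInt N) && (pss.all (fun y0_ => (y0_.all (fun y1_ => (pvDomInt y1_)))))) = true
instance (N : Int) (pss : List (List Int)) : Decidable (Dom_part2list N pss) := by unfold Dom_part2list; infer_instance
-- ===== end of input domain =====

-- B builds a dictionary element -> ordered list of block indices in one pass over pss,
-- then concatenates the lookups for i = 0..N-1 (objective: faster, O(N + total) vs A's O(N * total)).

-- ===== PORT A =====
def part2list (N : Int) (pss : List (List Int)) : List Int :=
  -- res=[]; l=len(pss); for i in range(N): for j in range(l): if i in pss[j]: res.append(j)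
  let l : Int := pss.length
  (PySem.List.pyRange 0 N 1).foldl (fun res i =>
    (PySem.List.pyRange 0 l 1).foldl (fun res j =>
      if i ∈ PySem.List.pyGetD pss j [] then res ++ [j] else res) res) []

-- ===== PORT B =====
-- at = {}; for j, ps in enumerate(pss): for x in dict.fromkeys(ps): at.setdefault(x, []).append(j)
def pvBuildIdx (pss : List (List Int)) : PySem.Dict Int (List Int) :=
  (PySem.List.enumerate pss).foldl
    (fun d p => (PySem.List.dedup p.2).foldl
      (fun d x => d.modify x [] (· ++ [p.1])) d)
    PySem.Dict.empty

def part2list_alt (N : Int) (pss : List (List Int)) : List Int :=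
  let at_ := pvBuildIdx pss
  -- res=[]; for i in range(N): res += at.get(i, [])
  (PySem.List.pyRange 0 N 1).foldl (fun res i => res ++ at_.getD i []) []

-- ===== PRECONDITION & SPEC =====
def Spec_part2list (N : Int) (pss : List (List Int)) (out : List Int) : Prop := out = part2list_alt N pss
instance (N : Int) (pss : List (List Int)) (out : List Int) : Decidable (Spec_part2list N pss out) := by unfold Spec_part2list; infer_instance

-- ===== CLAIM (what is proved, stated in full; the proofs are below) =====
def Claim_equal_part2list : Prop := ∀ (N : Int) (pss : List (List Int)), Dom_part2list N pss → Spec_part2list N pss (part2list N pss)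

-- ===== LEMMAS AND PROOFS =====

-- one block's update of the index: key i gains j exactly when i ∈ ps
theorem pvBlockStep (d : PySem.Dict Int (List Int)) (ps : List Int) (j i : Int) :
    ((PySem.List.dedup ps).foldl (fun d x => d.modify x [] (· ++ [j])) d).getD i []
      = d.getD i [] ++ (if i ∈ ps then [j] else []) := by
  have hmap : (PySem.List.dedup ps).foldl (fun d x => d.modify x [] (· ++ [j])) d
      = ((PySem.List.dedup ps).map (fun x => (x, j))).foldl
          (fun d p => d.modify p.1 [] (· ++ [p.2])) d := by
    rw [List.foldl_map]
  rw [hmap, PySem.Dict.getD_foldl_modify_append]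
  congr 1
  rw [List.filter_map]
  have hcomp : ((fun p => p.1 == i) ∘ (fun x => (x, j)) : Int → Bool) = (fun x => x == i) := rfl
  rw [hcomp]
  by_cases h : i ∈ ps
  · have hm : i ∈ PySem.List.dedup ps := (PySem.List.mem_dedup ps i).mpr h
    have h1 : (PySem.List.dedup ps).count i = 1 :=
      List.count_eq_one_of_mem (PySem.List.nodup_dedup ps) hm
    have hf : (PySem.List.dedup ps).filter (fun x => x == i) = List.replicate 1 i := by
      rw [← h1, ← List.filter_beq]
    rw [hf]
    simp [h]
  · have hm : i ∉ PySem.List.dedup ps := fun hc => h ((PySem.List.mem_dedup ps i).mp hc)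
    have hf : (PySem.List.dedup ps).filter (fun x => x == i) = [] := by
      rw [List.filter_eq_nil_iff]
      intro a ha hai
      have hai' : a = i := by simpa using hai
      exact hm (hai' ▸ ha)
    rw [hf]
    simp [h]

-- the index's bucket for i is exactly A's inner loop over the blocks
theorem pvIdxSpec (pss : List (List Int)) (i : Int) :
    (pvBuildIdx pss).getD i []
      = (PySem.List.pyRange 0 (pss.length : Int) 1).filter
          (fun j => decide (i ∈ PySem.List.pyGetD pss j [])) := by
  induction pss using List.reverseRecOn with
  | nil => simp [pvBuildIdx, PySem.List.pyRange_one_eq_nil (le_refl (0:Int)), PySem.List.enumerate_nil]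
  | append_singleton pss ps ih =>
    have hstep : pvBuildIdx (pss ++ [ps])
        = (PySem.List.dedup ps).foldl
            (fun d x => d.modify x [] (· ++ [((pss.length : Nat) : Int)])) (pvBuildIdx pss) := by
      unfold pvBuildIdx
      rw [PySem.List.enumerate_append]
      rw [show PySem.List.enumerate [ps] ((0:Int) + pss.length) = [(((pss.length : Nat) : Int), ps)] by
        simp [PySem.List.enumerate_cons, PySem.List.enumerate_nil]]
      simp only [List.foldl_append, List.foldl_cons, List.foldl_nil]
    rw [hstep, pvBlockStep, ih]
    rw [show (((pss ++ [ps]).length : Nat) : Int) = (pss.length : Int) + 1 by simp]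
    rw [PySem.List.pyRange_one_succ_right (by positivity)]
    rw [List.filter_append]
    congr 1
    · refine (List.filter_congr (fun j hj => ?_)).symm
      have h01 := (PySem.List.mem_pyRange_one).mp hj
      have h2 : j.toNat < pss.length := by omega
      have he : PySem.List.pyGetD (pss ++ [ps]) j [] = PySem.List.pyGetD pss j [] := by
        rw [PySem.List.pyGetD_of_nonneg _ _ h01.1, PySem.List.pyGetD_of_nonneg _ _ h01.1]
        exact List.getD_append _ _ _ _ h2
      rw [he]
    · have hg : PySem.List.pyGetD (pss ++ [ps]) ((pss.length : Nat) : Int) [] = ps := by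
        rw [PySem.List.pyGetD_natCast]
        simp
      by_cases hi : i ∈ ps <;> simp [hg, hi]

-- ===== VERDICT (by name: the statement is the Claim_ definition above) =====
theorem part2list_spec : Claim_equal_part2list := by
  intro N pss _
  unfold Spec_part2list part2list part2list_alt
  simp only [PySem.List.foldl_append_ite_eq_filter]
  simp only [pvIdxSpec]
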